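-- pv_equiv track=rewrite | github.com/maiconsalomon-hash/mps-robo-imoveis | site_health_history.py | _flapping_ok_erro
-- ===== SOURCE A (Python) =====
-- from typing import Any
--
-- def _is_ok(st: str) -> bool:
--     return st == "OK"
--
-- def _is_erro(st: str) -> bool:
--     return st.startswith("ERRO")
--
-- def _flapping_ok_erro(series_chr: list[dict[str, Any]]) -> bool:
--     flags: list[str] = []
--     for r in series_chr:
--         st = r["extraction_status"]
--         if _is_ok(st):
--             flags.append("OK")
--         elif _is_erro(st):
--             flags.append("ERRO")
--         # SUSPEITO não entra na alternância estrita OK/ERRO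
--     if len(flags) < 4:
--         return False
--     flips = sum(1 for i in range(len(flags) - 1) if flags[i] != flags[i + 1])
--     return flips >= 3 and set(flags) == {"OK", "ERRO"}
-- ===== SOURCE B (Python) =====
-- def _flapping_ok_erro(series_chr):
--     prev = None
--     flips = 0
--     for r in series_chr:
--         st = r["extraction_status"]
--         if st == "OK":
--             cur = "OK"
--         elif st.startswith("ERRO"):
--             cur = "ERRO"
--         else:
--             continue
--         if prev is not None and prev != cur:
--             flips += 1
--         prev = cur
--     return flips >= 3
-- ===== Notes on version B (the rewrite author's own statement) =====
-- stated objective: alternative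
-- what changed: B replaces A's build-the-flags-list-then-rescan (append to a list, then an index-based adjacent-pair sum and a set comparison) with a single pass keeping only the previous flag and a flip counter, returning flips >= 3, which entails A's len>=4 and {OK,ERRO} conditions.
import Mathlib
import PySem

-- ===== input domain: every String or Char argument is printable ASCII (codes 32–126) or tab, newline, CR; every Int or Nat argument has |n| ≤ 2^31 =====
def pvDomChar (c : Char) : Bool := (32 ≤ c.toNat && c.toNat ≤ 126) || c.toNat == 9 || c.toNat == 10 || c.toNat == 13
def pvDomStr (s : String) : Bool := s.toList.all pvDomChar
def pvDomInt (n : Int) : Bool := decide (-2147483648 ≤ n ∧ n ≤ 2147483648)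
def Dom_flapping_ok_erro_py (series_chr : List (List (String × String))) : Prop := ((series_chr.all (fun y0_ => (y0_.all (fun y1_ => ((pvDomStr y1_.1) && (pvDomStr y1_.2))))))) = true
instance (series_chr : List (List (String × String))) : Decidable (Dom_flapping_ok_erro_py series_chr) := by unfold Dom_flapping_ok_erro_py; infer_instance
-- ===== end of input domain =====

-- B is a single pass keeping only (prev flag, flip count) instead of building the flags list
-- and re-scanning it; it returns flips >= 3 (which entails len >= 4 and both flags seen).

-- ===== PORT A =====
-- r["extraction_status"] under Pre_ (key present): first-match assoc lookup, default never used
def fapStatus (r : List (String × String)) : String :=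
  (List.lookup "extraction_status" r).getD ""

def flapping_ok_erro_py (series_chr : List (List (String × String))) : Bool :=
  let flags : List String := series_chr.foldl (fun flags r =>
    let st := fapStatus r
    if st == "OK" then flags ++ ["OK"]
    else if PySem.Str.startswith st "ERRO" then flags ++ ["ERRO"]
    else flags) []
  if flags.length < 4 then false
  else
    let flips : Int := ((PySem.List.pyRange 0 (PySem.List.len flags - 1) 1).map
      (fun i => if PySem.List.pyGetD flags i "" ≠ PySem.List.pyGetD flags (i + 1) "" then (1 : Int) else 0)).sum
    decide (3 ≤ flips) && PySem.Set.equal (PySem.Set.ofList flags) (PySem.Set.ofList ["OK", "ERRO"])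

-- ===== PORT B =====
def fapClassify (st : String) : Option String :=
  if st == "OK" then some "OK"
  else if PySem.Str.startswith st "ERRO" then some "ERRO"
  else none

def fapStep (acc : Option String × Int) (r : List (String × String)) : Option String × Int :=
  match fapClassify (fapStatus r) with
  | none => acc
  | some cur =>
    (some cur, acc.2 + (match acc.1 with
      | some p => if p ≠ cur then 1 else 0
      | none => 0))

def flapping_ok_erro_py_alt (series_chr : List (List (String × String))) : Bool :=
  let s := series_chr.foldl fapStep (none, 0)
  decide (3 ≤ s.2)

-- ===== PRECONDITION & SPEC =====
-- Pre_ excludes exactly the rows on which A raises KeyError: a row without the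
-- "extraction_status" key.
def Pre_flapping_ok_erro_py (series_chr : List (List (String × String))) : Prop :=
  ∀ r ∈ series_chr, (List.lookup "extraction_status" r).isSome = true
instance (series_chr : List (List (String × String))) : Decidable (Pre_flapping_ok_erro_py series_chr) := by unfold Pre_flapping_ok_erro_py; infer_instance

def pvWitness_flapping_ok_erro_py : (List (List (String × String))) :=
  [[("extraction_status", "OK")], [("extraction_status", "ERRO timeout")]]

def Spec_flapping_ok_erro_py (series_chr : List (List (String × String))) (out : Bool) : Prop := out = flapping_ok_erro_py_alt series_chr
instance (series_chr : List (List (String × String))) (out : Bool) : Decidable (Spec_flapping_ok_erro_py series_chr out) := by unfold Spec_flapping_ok_erro_py; infer_instance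

-- ===== CLAIM (what is proved, stated in full; the proofs are below) =====
def Claim_equal_flapping_ok_erro_py : Prop := ∀ (series_chr : List (List (String × String))), Dom_flapping_ok_erro_py series_chr → Pre_flapping_ok_erro_py series_chr → Spec_flapping_ok_erro_py series_chr (flapping_ok_erro_py series_chr)

-- ===== LEMMAS AND PROOFS =====

def fapFlag (r : List (String × String)) : Option String := fapClassify (fapStatus r)

-- pure flag-fold step used to restate B's loop over the classified flags
def fapFStep (acc : Option String × Int) (cur : String) : Option String × Int :=
  (some cur, acc.2 + (match acc.1 with
    | some p => if p ≠ cur then (1 : Int) else 0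
    | none => 0))

-- number of adjacent unequal pairs in the flags list
def fapFlip : List String → Int
  | [] => 0
  | [_] => 0
  | a :: b :: t => (if a ≠ b then 1 else 0) + fapFlip (b :: t)

lemma fapClassify_mem (st : String) (x : String) (h : fapClassify st = some x) :
    x = "OK" ∨ x = "ERRO" := by
  unfold fapClassify at h
  split_ifs at h <;> simp_all

-- A's loop builds exactly the classified flags
lemma flagsA_eq (l : List (List (String × String))) (acc : List String) :
    l.foldl (fun flags r =>
      let st := fapStatus r
      if st == "OK" then flags ++ ["OK"]
      else if PySem.Str.startswith st "ERRO" then flags ++ ["ERRO"]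
      else flags) acc = acc ++ l.filterMap fapFlag := by
  induction l generalizing acc with
  | nil => simp
  | cons r t ih =>
    simp only [List.foldl_cons, List.filterMap_cons, ih]
    unfold fapFlag fapClassify
    split_ifs <;> simp

-- B's loop over rows is the corresponding loop over the classified flags
lemma foldB_eq (l : List (List (String × String))) (acc : Option String × Int) :
    l.foldl fapStep acc = (l.filterMap fapFlag).foldl fapFStep acc := by
  induction l generalizing acc with
  | nil => simp
  | cons r t ih =>
    simp only [List.foldl_cons, List.filterMap_cons]
    cases h : fapFlag r with
    | none =>
      have hs : fapStep acc r = acc := by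
        unfold fapStep; rw [show fapClassify (fapStatus r) = none from h]
      rw [hs]; exact ih acc
    | some cur =>
      have hs : fapStep acc r = fapFStep acc cur := by
        unfold fapStep fapFStep; rw [show fapClassify (fapStatus r) = some cur from h]
      rw [hs]; exact ih (fapFStep acc cur)

-- the pure flag fold counts flips
lemma foldFlags_flip (fs : List String) (p : String) (n : Int) :
    (fs.foldl fapFStep (some p, n)).2 = n + fapFlip (p :: fs) := by
  induction fs generalizing p n with
  | nil => simp [fapFlip]
  | cons c t ih =>
    have hstep : fapFStep (some p, n) c = (some c, n + if p ≠ c then (1 : Int) else 0) := rfl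
    rw [List.foldl_cons, hstep, ih]
    simp only [fapFlip]
    split_ifs <;> ring

lemma foldFlags_flip_none (fs : List String) :
    (fs.foldl fapFStep ((none : Option String), (0 : Int))).2 = fapFlip fs := by
  cases fs with
  | nil => simp [fapFlip]
  | cons c t =>
    have hstep : fapFStep (none, 0) c = (some c, (0 : Int)) := rfl
    rw [List.foldl_cons, hstep]
    simpa using foldFlags_flip t c 0

-- A's range/index sum is the same flip count
lemma sumRange_flip (fs : List String) :
    ((List.range (fs.length - 1)).map
      (fun k => if fs.getD k "" ≠ fs.getD (k + 1) "" then (1 : Int) else 0)).sum = fapFlip fs := by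
  induction fs with
  | nil => simp [fapFlip]
  | cons a t ih =>
    cases t with
    | nil => simp [fapFlip]
    | cons b u =>
      have hlen : (a :: b :: u).length - 1 = ((b :: u).length - 1) + 1 := by simp
      rw [hlen, List.range_succ_eq_map]
      simp only [List.map_cons, List.sum_cons, List.map_map]
      have hmap : List.map
          ((fun k => if (a :: b :: u).getD k "" ≠ (a :: b :: u).getD (k + 1) "" then (1 : Int) else 0)
            ∘ Nat.succ) (List.range ((b :: u).length - 1))
          = List.map (fun k => if (b :: u).getD k "" ≠ (b :: u).getD (k + 1) "" then (1 : Int) else 0)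
            (List.range ((b :: u).length - 1)) := by
        apply List.map_congr_left
        intro k _
        simp [Function.comp]
      rw [hmap, ih]
      simp [fapFlip]

lemma fapFlip_le (a : String) (t : List String) : fapFlip (a :: t) ≤ t.length := by
  induction t generalizing a with
  | nil => simp [fapFlip]
  | cons b u ih =>
    have := ih b
    simp only [fapFlip, List.length_cons] at *
    split_ifs <;> push_cast <;> omega

lemma fapFlip_both_mem (fs : List String) (hm : ∀ x ∈ fs, x = "OK" ∨ x = "ERRO")
    (h1 : 1 ≤ fapFlip fs) : "OK" ∈ fs ∧ "ERRO" ∈ fs := by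
  induction fs with
  | nil => simp [fapFlip] at h1
  | cons a t ih =>
    cases t with
    | nil => simp [fapFlip] at h1
    | cons b u =>
      by_cases hab : a = b
      · have h1' : 1 ≤ fapFlip (b :: u) := by
          simp only [fapFlip, hab, ne_eq, not_true_eq_false, if_false] at h1 ⊢
          simpa using h1
        have := ih (fun x hx => hm x (by simp at hx ⊢; tauto)) h1'
        exact ⟨by simp [this.1], by simp [this.2]⟩
      · have ha := hm a (by simp)
        have hb := hm b (by simp)
        rcases ha with ha | ha <;> rcases hb with hb | hb <;>
          first
          | (exact absurd (ha.trans hb.symm) hab)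
          | (constructor <;> simp [ha, hb])

lemma filterMap_flag_mem (l : List (List (String × String))) (x : String)
    (hx : x ∈ l.filterMap fapFlag) : x = "OK" ∨ x = "ERRO" := by
  rcases List.mem_filterMap.mp hx with ⟨r, _, hr⟩
  exact fapClassify_mem _ _ hr

-- ===== VERDICT (by name: the statement is the Claim_ definition above) =====
theorem flapping_ok_erro_py_spec : Claim_equal_flapping_ok_erro_py := by
  intro series_chr _ _
  unfold Spec_flapping_ok_erro_py flapping_ok_erro_py flapping_ok_erro_py_alt
  dsimp only
  rw [flagsA_eq, foldB_eq]
  rw [List.nil_append]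
  set fs := series_chr.filterMap fapFlag with hfs
  clear_value fs
  rw [foldFlags_flip_none]
  have hsum : ((PySem.List.pyRange 0 (PySem.List.len fs - 1) 1).map
      (fun i => if PySem.List.pyGetD fs i "" ≠ PySem.List.pyGetD fs (i + 1) "" then (1 : Int) else 0)).sum
      = fapFlip fs := by
    rw [PySem.List.pyRange_one]
    simp only [PySem.List.len_eq, sub_zero, List.map_map]
    rw [← sumRange_flip fs]
    have hcast : ((fs.length : Int) - 1).toNat = fs.length - 1 := by omega
    rw [hcast]
    congr 1
    apply List.map_congr_left
    intro k _
    simp only [Function.comp_apply, zero_add]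
    have h1 : PySem.List.pyGetD fs (k : Int) "" = fs.getD k "" := by
      simp [PySem.List.pyGetD_natCast]
    have h2 : PySem.List.pyGetD fs ((k : Int) + 1) "" = fs.getD (k + 1) "" := by
      rw [show ((k : Int) + 1) = ((k + 1 : Nat) : Int) from by push_cast; ring,
        PySem.List.pyGetD_natCast]
    rw [h1, h2]
  rw [hsum]
  by_cases h3 : 3 ≤ fapFlip fs
  · -- flips ≥ 3: length ≥ 4 and both flags occur
    have hlen : ¬ fs.length < 4 := by
      cases hc : fs with
      | nil => rw [hc] at h3; simp [fapFlip] at h3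
      | cons a t =>
        have := fapFlip_le a t
        rw [hc] at h3
        simp only [List.length_cons]
        omega
    have hmem : ∀ x ∈ fs, x = "OK" ∨ x = "ERRO" := fun x hx =>
      filterMap_flag_mem series_chr x (hfs ▸ hx)
    have hboth := fapFlip_both_mem fs hmem (by omega)
    have hset : PySem.Set.equal (PySem.Set.ofList fs) (PySem.Set.ofList ["OK", "ERRO"]) = true := by
      rw [PySem.Set.equal_iff]
      intro x
      rw [PySem.Set.mem_ofList, PySem.Set.mem_ofList]
      constructor
      · intro hx; rcases hmem x hx with h | h <;> simp [h]
      · intro hx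
        rcases List.mem_cons.mp hx with h | h
        · exact h ▸ hboth.1
        · simp only [List.mem_singleton] at h; exact h ▸ hboth.2
    simp [hlen, hset, h3]
  · -- flips < 3: both sides false
    simp only [decide_eq_false h3, Bool.false_and]
    split_ifs <;> rfl
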